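-- pv_equiv track=rewrite | github.com/xiongziyiwinnie/Xiong_Python | Xiong_HW3.py | encoder_decoder
-- ===== SOURCE A (Python) =====
-- def encoder_decoder(string):
--     """
--      This funcrion is to transform a string into a new one following rule ROT-13.And the key for ROT-13 is represented
--      in a dictionary defined in function
--
--      Parameters:
--      string - any kind of string.But note that here only encode or decode English letters with other characters
--               unchanged
--     """
--     key={'a':'n', 'b':'o', 'c':'p', 'd':'q', 'e':'r', 'f':'s', 'g':'t', 'h':'u',
--        'i':'v', 'j':'w', 'k':'x', 'l':'y', 'm':'z', 'n':'a', 'o':'b', 'p':'c',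
--        'q':'d', 'r':'e', 's':'f', 't':'g', 'u':'h', 'v':'i', 'w':'j', 'x':'k',
--        'y':'l', 'z':'m', 'A':'N', 'B':'O', 'C':'P', 'D':'Q', 'E':'R', 'F':'S',
--        'G':'T', 'H':'U', 'I':'V', 'J':'W', 'K':'X', 'L':'Y', 'M':'Z', 'N':'A',
--        'O':'B', 'P':'C', 'Q':'D', 'R':'E', 'S':'F', 'T':'G', 'U':'H', 'V':'I',
--        'W':'J', 'X':'K', 'Y':'L', 'Z':'M'}                                         #create key for translation matching
--
--     newString=""                            #create an empty string to store the encoding or decoding result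
--
--     for c in string:                        #use 'for' loop to get each character in string
--         if key.get(c)== None:               #check whether the current character has a corresponding one in dictionary,if not,
--             newString=newString+c           #update the newString by adding it with no change
--         else:                               #if it has been matched,update the newString by adding the corresponding letter
--             newString=newString+key.get(c)
--     return newString                        #return the final newString encoding or decoding result
-- ===== SOURCE B (Python) =====
-- def encoder_decoder(string):
--     out = []
--     for c in string:
--         o = ord(c)
--         if 97 <= o <= 122:
--             out.append(chr((o - 97 + 13) % 26 + 97))
--         elif 65 <= o <= 90:
--             out.append(chr((o - 65 + 13) % 26 + 65))
--         else:
--             out.append(c)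
--     return "".join(out)
-- ===== Notes on version B (the rewrite author's own statement) =====
-- stated objective: idiomatic
-- what changed: Replaces the 52-entry hard-coded translation dictionary and repeated string concatenation with per-character modular arithmetic over the two ASCII letter ranges, accumulated in a list joined once.
import Mathlib
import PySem

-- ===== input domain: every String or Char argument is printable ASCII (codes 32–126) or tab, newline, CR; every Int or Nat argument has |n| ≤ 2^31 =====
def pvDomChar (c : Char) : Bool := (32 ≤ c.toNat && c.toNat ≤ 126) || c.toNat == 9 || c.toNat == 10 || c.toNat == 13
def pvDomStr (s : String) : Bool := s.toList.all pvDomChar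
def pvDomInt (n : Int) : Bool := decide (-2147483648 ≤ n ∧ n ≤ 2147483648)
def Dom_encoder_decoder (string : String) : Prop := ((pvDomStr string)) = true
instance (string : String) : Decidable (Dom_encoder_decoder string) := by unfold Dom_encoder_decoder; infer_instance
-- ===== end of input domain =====

-- B replaces A's hard-coded 52-entry ROT-13 dictionary with per-character modular arithmetic (idiomatic).

-- ===== PORT A =====
-- the literal dictionary 'key' from A
def rot13Key : PySem.Dict Char Char := PySem.Dict.ofList
  [('a','n'), ('b','o'), ('c','p'), ('d','q'), ('e','r'), ('f','s'), ('g','t'), ('h','u'),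
   ('i','v'), ('j','w'), ('k','x'), ('l','y'), ('m','z'), ('n','a'), ('o','b'), ('p','c'),
   ('q','d'), ('r','e'), ('s','f'), ('t','g'), ('u','h'), ('v','i'), ('w','j'), ('x','k'),
   ('y','l'), ('z','m'), ('A','N'), ('B','O'), ('C','P'), ('D','Q'), ('E','R'), ('F','S'),
   ('G','T'), ('H','U'), ('I','V'), ('J','W'), ('K','X'), ('L','Y'), ('M','Z'), ('N','A'),
   ('O','B'), ('P','C'), ('Q','D'), ('R','E'), ('S','F'), ('T','G'), ('U','H'), ('V','I'),
   ('W','J'), ('X','K'), ('Y','L'), ('Z','M')]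

def encoder_decoder (string : String) : String :=
  String.ofList (string.toList.foldl
    (fun newString c =>
      match rot13Key.get? c with
      | none => newString ++ [c]          -- key.get(c) == None: append c unchanged
      | some v => newString ++ [v])       -- append key.get(c)
    [])

-- ===== PORT B =====
def rotChar (c : Char) : Char :=
  let o := c.toNat
  if 97 ≤ o ∧ o ≤ 122 then Char.ofNat ((o - 97 + 13) % 26 + 97)
  else if 65 ≤ o ∧ o ≤ 90 then Char.ofNat ((o - 65 + 13) % 26 + 65)
  else c

def encoder_decoder_alt (string : String) : String :=
  String.ofList (string.toList.map rotChar)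

-- ===== PRECONDITION & SPEC =====
def Spec_encoder_decoder (string : String) (out : String) : Prop := out = encoder_decoder_alt string
instance (string : String) (out : String) : Decidable (Spec_encoder_decoder string out) := by unfold Spec_encoder_decoder; infer_instance

-- ===== CLAIM (what is proved, stated in full; the proofs are below) =====
def Claim_equal_encoder_decoder : Prop := ∀ (string : String), Dom_encoder_decoder string → Spec_encoder_decoder string (encoder_decoder string)

-- ===== LEMMAS AND PROOFS =====

-- A's per-character result (dict lookup) agrees with B's arithmetic rotation on every ASCII char
def rotA (c : Char) : Char :=
  match rot13Key.get? c with
  | none => c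
  | some v => v

set_option maxRecDepth 8192 in
theorem rotA_eq_rotChar_ascii : ∀ n : Fin 128, rotA (Char.ofNat n.val) = rotChar (Char.ofNat n.val) := by
  decide

theorem rotA_eq_rotChar {c : Char} (h : pvDomChar c = true) : rotA c = rotChar c := by
  have hlt : c.toNat < 128 := by
    simp [pvDomChar] at h
    omega
  have := rotA_eq_rotChar_ascii ⟨c.toNat, hlt⟩
  simpa [Char.ofNat_toNat] using this

-- ===== VERDICT (by name: the statement is the Claim_ definition above) =====
theorem encoder_decoder_spec : Claim_equal_encoder_decoder := by
  intro s hdom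
  unfold Spec_encoder_decoder encoder_decoder encoder_decoder_alt
  congr 1
  have h1 : s.toList.foldl
      (fun newString c =>
        match rot13Key.get? c with
        | none => newString ++ [c]
        | some v => newString ++ [v]) []
      = s.toList.foldl (fun newString c => newString ++ [rotA c]) [] := by
    apply PySem.List.foldl_congr_mem
    intro acc c _
    unfold rotA
    cases rot13Key.get? c <;> rfl
  rw [h1, PySem.List.foldl_append_singleton_eq_map, List.nil_append]
  apply List.map_congr_left
  intro c hc
  exact rotA_eq_rotChar (by
    have : s.toList.all pvDomChar = true := hdom
    exact List.all_eq_true.mp this c hc)
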